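-- pv_equiv track=rewrite | github.com/itllbefine/provenance | backend/routers/timeline.py | _pm_to_text
-- ===== SOURCE A (Python) =====
-- _DocBuffer = list[tuple[str, str, str | None]]
--
-- def _pm_to_text(pm_pos: int, doc: _DocBuffer) -> int:
--     """Walk the buffer and return the text-buffer index for *pm_pos*."""
--     cur_pm = 1
--     for i, (ch, _, _) in enumerate(doc):
--         if cur_pm >= pm_pos:
--             return i
--         if ch == "\n":
--             cur_pm += 2
--         else:
--             cur_pm += 1
--     return len(doc)
-- ===== SOURCE B (Python) =====
-- def _pm_to_text(pm_pos: int, doc) -> int: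
--     """Build the prefix table of PM positions, then binary-search it."""
--     prefix = []
--     cur = 1
--     for ch, _, _ in doc:
--         prefix.append(cur)
--         cur = cur + 2 if ch == "\n" else cur + 1
--     lo, hi = 0, len(prefix)
--     while lo < hi:
--         mid = (lo + hi) // 2
--         if prefix[mid] < pm_pos:
--             lo = mid + 1
--         else:
--             hi = mid
--     return lo
-- ===== Notes on version B (the rewrite author's own statement) =====
-- stated objective: alternative
-- what changed: Replaces the incremental scan-and-test with a build-prefix-table-then-binary-search decomposition (hand-written bisect_left over the non-decreasing cumulative PM positions).
import Mathlib
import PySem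

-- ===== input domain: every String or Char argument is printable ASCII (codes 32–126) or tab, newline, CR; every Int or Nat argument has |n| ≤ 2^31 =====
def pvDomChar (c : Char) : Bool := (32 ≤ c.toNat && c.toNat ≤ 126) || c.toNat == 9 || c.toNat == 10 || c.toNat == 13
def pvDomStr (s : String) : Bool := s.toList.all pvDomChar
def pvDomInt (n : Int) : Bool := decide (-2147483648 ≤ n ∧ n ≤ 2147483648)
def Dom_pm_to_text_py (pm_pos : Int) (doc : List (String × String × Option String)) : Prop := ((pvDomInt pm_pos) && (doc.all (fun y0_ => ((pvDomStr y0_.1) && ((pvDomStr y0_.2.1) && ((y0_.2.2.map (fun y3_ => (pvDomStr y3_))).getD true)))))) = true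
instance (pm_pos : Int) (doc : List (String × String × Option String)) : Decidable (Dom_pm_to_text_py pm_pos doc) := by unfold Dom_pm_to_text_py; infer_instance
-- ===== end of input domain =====

-- B replaces A's incremental scan-and-test with building a prefix table of cumulative
-- PM positions and binary-searching it (alternative decomposition; same exact result).

-- ===== PORT A =====
-- A's for-loop with early return: `none` = the loop fell through (then A returns len(doc)).
def pmA_loop (pm_pos cur : Int) (i : Nat) : List (String × String × Option String) → Option Nat
  | [] => none
  | (ch, _, _) :: rest =>
    if pm_pos ≤ cur then some i
    else pmA_loop pm_pos (cur + if ch = "\n" then 2 else 1) (i + 1) rest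

def pm_to_text_py (pm_pos : Int) (doc : List (String × String × Option String)) : Int :=
  match pmA_loop pm_pos 1 0 doc with
  | some i => (i : Int)
  | none => (doc.length : Int)

-- ===== PORT B =====
-- Source B's while-loop; prefix[mid] is always in range (lo < hi ≤ len), ported as getD.
def pmB_bisect (pm_pos : Int) (p : List Int) (lo hi : Nat) : Nat :=
  if _h : lo < hi then
    let mid := (lo + hi) / 2
    if p.getD mid 0 < pm_pos then pmB_bisect pm_pos p (mid + 1) hi
    else pmB_bisect pm_pos p lo mid
  else lo
termination_by hi - lo
decreasing_by all_goals omega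

def pm_to_text_py_alt (pm_pos : Int) (doc : List (String × String × Option String)) : Int :=
  -- the prefix-building for-loop of Source B, as a fold over the (prefix, cur) state
  let st := doc.foldl
    (fun (s : List Int × Int) t => (s.1 ++ [s.2], s.2 + if t.1 = "\n" then 2 else 1))
    ([], 1)
  (pmB_bisect pm_pos st.1 0 st.1.length : Int)

-- ===== PRECONDITION & SPEC =====
def Spec_pm_to_text_py (pm_pos : Int) (doc : List (String × String × Option String)) (out : Int) : Prop := out = pm_to_text_py_alt pm_pos doc
instance (pm_pos : Int) (doc : List (String × String × Option String)) (out : Int) : Decidable (Spec_pm_to_text_py pm_pos doc out) := by unfold Spec_pm_to_text_py; infer_instance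

-- ===== CLAIM (what is proved, stated in full; the proofs are below) =====
def Claim_equal_pm_to_text_py : Prop := ∀ (pm_pos : Int) (doc : List (String × String × Option String)), Dom_pm_to_text_py pm_pos doc → Spec_pm_to_text_py pm_pos doc (pm_to_text_py pm_pos doc)

-- ===== LEMMAS AND PROOFS =====

-- the prefix table, as a value-passing recursion (proof-side model of B's fold)
def pvPref (cur : Int) : List (String × String × Option String) → List Int
  | [] => []
  | (ch, _, _) :: rest => cur :: pvPref (cur + if ch = "\n" then 2 else 1) rest

def pvCurAfter (cur : Int) : List (String × String × Option String) → Int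
  | [] => cur
  | (ch, _, _) :: rest => pvCurAfter (cur + if ch = "\n" then 2 else 1) rest

-- B's fold builds exactly `acc ++ pvPref cur doc`
theorem pvFoldl_pref (doc : List (String × String × Option String)) :
    ∀ (acc : List Int) (cur : Int),
      doc.foldl (fun (s : List Int × Int) t => (s.1 ++ [s.2], s.2 + if t.1 = "\n" then 2 else 1)) (acc, cur)
        = (acc ++ pvPref cur doc, pvCurAfter cur doc) := by
  induction doc with
  | nil => intro acc cur; simp [pvPref, pvCurAfter]
  | cons hd tl ih =>
    intro acc cur
    obtain ⟨ch, b, c⟩ := hd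
    simp only [List.foldl_cons, pvPref, pvCurAfter, ih, List.append_assoc, List.singleton_append]

-- every entry of the prefix table is ≥ its starting value
theorem pvPref_ge (doc : List (String × String × Option String)) :
    ∀ (cur : Int) (v : Int), v ∈ pvPref cur doc → cur ≤ v := by
  induction doc with
  | nil => intro cur v h; simp [pvPref] at h
  | cons hd tl ih =>
    intro cur v h
    obtain ⟨ch, b, c⟩ := hd
    simp only [pvPref, List.mem_cons] at h
    rcases h with h | h
    · omega
    · have := ih _ _ h
      split at this <;> omega

theorem pvPref_pairwise (doc : List (String × String × Option String)) :
    ∀ (cur : Int), List.Pairwise (· ≤ ·) (pvPref cur doc) := by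
  induction doc with
  | nil => intro cur; simp [pvPref]
  | cons hd tl ih =>
    intro cur
    obtain ⟨ch, b, c⟩ := hd
    refine List.Pairwise.cons ?_ (ih _)
    intro v hv
    have := pvPref_ge tl _ v hv
    split at this <;> omega

theorem pvPref_length (doc : List (String × String × Option String)) :
    ∀ (cur : Int), (pvPref cur doc).length = doc.length := by
  induction doc with
  | nil => intro cur; simp [pvPref]
  | cons hd tl ih =>
    intro cur; obtain ⟨ch, b, c⟩ := hd; simp [pvPref, ih]

-- A's loop returns i + (findIdx of the prefix table) when found, none when it = length
theorem pvA_loop_findIdx (doc : List (String × String × Option String)) :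
    ∀ (pm cur : Int) (i : Nat),
      pmA_loop pm cur i doc
        = (if (pvPref cur doc).findIdx (fun v => decide (pm ≤ v)) < doc.length
            then some (i + (pvPref cur doc).findIdx (fun v => decide (pm ≤ v))) else none) := by
  induction doc with
  | nil => intro pm cur i; simp [pmA_loop, pvPref]
  | cons hd tl ih =>
    intro pm cur i
    obtain ⟨ch, b, c⟩ := hd
    by_cases hle : pm ≤ cur
    · simp [pmA_loop, pvPref, hle, List.findIdx_cons]
    · have hd' : decide (pm ≤ cur) = false := decide_eq_false hle
      simp only [pmA_loop, pvPref, List.findIdx_cons, List.length_cons, if_neg hle, hd',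
        cond_false]
      generalize (cur + if ch = "\n" then (2 : Int) else 1) = cur'
      rw [ih pm cur' (i + 1)]
      have hfle : (pvPref cur' tl).findIdx (fun v => decide (pm ≤ v)) ≤ tl.length := by
        have := List.findIdx_le_length
          (p := fun v => decide (pm ≤ v)) (xs := pvPref cur' tl)
        simpa [pvPref_length tl] using this
      by_cases hf : (pvPref cur' tl).findIdx (fun v => decide (pm ≤ v)) < tl.length
      · rw [if_pos hf, if_pos (by omega)]
        congr 1
        omega
      · rw [if_neg hf, if_neg (by omega)]

-- binary-search correctness: on a sorted list, Source B's bisect loop lands on findIdx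
theorem pvBisect_eq_findIdx (pm : Int) (p : List Int) (hp : List.Pairwise (· ≤ ·) p) :
    ∀ (n lo hi : Nat), hi - lo ≤ n → hi ≤ p.length →
      lo ≤ p.findIdx (fun v => decide (pm ≤ v)) →
      p.findIdx (fun v => decide (pm ≤ v)) ≤ hi →
      pmB_bisect pm p lo hi = p.findIdx (fun v => decide (pm ≤ v)) := by
  intro n
  induction n with
  | zero =>
    intro lo hi hfuel _ hlo hhi
    rw [pmB_bisect]
    rw [dif_neg (by omega)]
    omega
  | succ n ih =>
    intro lo hi hfuel hlen hlo hhi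
    by_cases h : lo < hi
    · have hmidlt : (lo + hi) / 2 < hi := by omega
      have hmidge : lo ≤ (lo + hi) / 2 := by omega
      have hmlen : (lo + hi) / 2 < p.length := by omega
      have hget : p.getD ((lo + hi) / 2) 0 = p[(lo + hi) / 2] := List.getD_eq_getElem p 0 hmlen
      rw [pmB_bisect, dif_pos h]
      simp only [hget]
      by_cases hc : p[(lo + hi) / 2] < pm
      · rw [if_pos hc]
        have hk : (lo + hi) / 2 + 1 ≤ p.findIdx (fun v => decide (pm ≤ v)) := by
          by_contra hk
          have hkm : p.findIdx (fun v => decide (pm ≤ v)) ≤ (lo + hi) / 2 := by omega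
          have hklen : p.findIdx (fun v => decide (pm ≤ v)) < p.length := by omega
          have hpk : pm ≤ p[p.findIdx (fun v => decide (pm ≤ v))] := by
            have := List.findIdx_getElem (w := hklen)
            simpa using this
          have hle2 : p[p.findIdx (fun v => decide (pm ≤ v))] ≤ p[(lo + hi) / 2] := by
            rcases Nat.lt_or_ge (p.findIdx (fun v => decide (pm ≤ v))) ((lo + hi) / 2) with hlt | hge
            · exact List.pairwise_iff_getElem.mp hp _ _ hklen hmlen hlt
            · have : p.findIdx (fun v => decide (pm ≤ v)) = (lo + hi) / 2 := by omega
              simp [this]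
          omega
        exact ih ((lo + hi) / 2 + 1) hi (by omega) hlen hk hhi
      · rw [if_neg hc]
        have hk : p.findIdx (fun v => decide (pm ≤ v)) ≤ (lo + hi) / 2 := by
          by_contra hk
          have := List.not_of_lt_findIdx (p := fun v => decide (pm ≤ v)) (xs := p)
            (i := (lo + hi) / 2) (by omega)
          simp only [decide_eq_false_iff_not] at this
          omega
        exact ih lo ((lo + hi) / 2) (by omega) (by omega) hlo hk
    · rw [pmB_bisect, dif_neg h]
      omega

-- ===== VERDICT (by name: the statement is the Claim_ definition above) =====
theorem pm_to_text_py_spec : Claim_equal_pm_to_text_py := by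
  intro pm doc _
  unfold Spec_pm_to_text_py pm_to_text_py pm_to_text_py_alt
  rw [pvFoldl_pref doc [] 1]
  simp only [List.nil_append]
  have hlen := pvPref_length doc 1
  have hkle : (pvPref 1 doc).findIdx (fun v => decide (pm ≤ v)) ≤ (pvPref 1 doc).length :=
    List.findIdx_le_length
  rw [pvBisect_eq_findIdx pm (pvPref 1 doc) (pvPref_pairwise doc 1)
    ((pvPref 1 doc).length) 0 ((pvPref 1 doc).length) (by omega) (le_refl _) (Nat.zero_le _) hkle]
  rw [pvA_loop_findIdx doc pm 1 0]
  by_cases hf : (pvPref 1 doc).findIdx (fun v => decide (pm ≤ v)) < doc.length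
  · rw [if_pos hf]; simp
  · rw [if_neg hf]; simp; omega
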